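-- pv_equiv track=rewrite | github.com/Vishnu-Gollakaram/DSAPrep | 2246-maximum-employees-to-be-invited-to-a-meeting/2246-maximum-employees-to-be-invited-to-a-meeting.py | get_max_cycle_length
-- ===== SOURCE A (Python) =====
-- from typing import List
--
-- def get_max_cycle_length(favorite: List[int]) -> int:
--     person_cnt = len(favorite)
--     max_cycle_length = 0
--
--     seen = set()
--
--     # for each person
--     for i in range(person_cnt):
--         # i - person i
--
--         # if person not part of any chain (chain with cycle)
--         if i in seen:
--             continue
--
--         # begin of chain (chain with cycle)
--         begin_person = i
--
--         # visited nodes inside of chain (chain with cycle)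
--         cur_visited = set()
--
--         # cur_person
--         cur_person = i
--
--         # try to build chain with cycle
--         while cur_person not in seen:
--             seen.add(cur_person)
--             cur_visited.add(cur_person)
--             cur_person = favorite[cur_person]
--
--         # if cycle exists
--         if cur_person in cur_visited:
--             # length of chain with cycle
--             visited_person_cnt = len(cur_visited)
--
--             # try to find length of cycle
--             while begin_person != cur_person:
--                 visited_person_cnt -= 1
--                 begin_person = favorite[begin_person]
--
--             max_cycle_length = max(max_cycle_length, visited_person_cnt)
--
--     return max_cycle_length
-- ===== SOURCE B (Python) =====
-- from typing import List
--
-- def get_max_cycle_length(favorite: List[int]) -> int: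
--     # One global dict: node -> (walk start, step index in that walk).
--     # A cycle closes exactly when the walk meets a node marked by the SAME walk;
--     # its length is then step - marked step, so no second pointer chase is needed.
--     mark = {}
--     best = 0
--     for i in range(len(favorite)):
--         if i in mark:
--             continue
--         cur, step = i, 0
--         while cur not in mark:
--             mark[cur] = (i, step)
--             step += 1
--             cur = favorite[cur]
--         start, d = mark[cur]
--         if start == i:
--             best = max(best, step - d)
--     return best
-- ===== Notes on version B (the rewrite author's own statement) =====
-- stated objective: alternative
-- what changed: B drops A's two sets and its second pointer-chasing loop: a single global dict maps each node to (walk start, step index), a cycle is detected by the met node carrying the current start, and its length is computed arithmetically as step - marked step.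
import Mathlib
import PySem

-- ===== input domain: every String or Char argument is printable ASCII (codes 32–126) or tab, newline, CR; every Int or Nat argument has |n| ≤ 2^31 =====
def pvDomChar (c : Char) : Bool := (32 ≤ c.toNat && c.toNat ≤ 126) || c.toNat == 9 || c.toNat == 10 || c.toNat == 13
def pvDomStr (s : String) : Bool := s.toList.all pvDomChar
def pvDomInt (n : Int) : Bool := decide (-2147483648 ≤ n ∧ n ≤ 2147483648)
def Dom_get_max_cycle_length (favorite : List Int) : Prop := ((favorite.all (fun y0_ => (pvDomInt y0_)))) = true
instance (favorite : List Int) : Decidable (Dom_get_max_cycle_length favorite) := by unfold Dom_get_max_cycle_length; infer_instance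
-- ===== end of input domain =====

-- B replaces A's two sets and second "walk begin_person forward to the meeting node" loop by a
-- single global dict node ↦ (walk start, step); a cycle closes iff the met node carries the
-- current start, and its length is step - marked step. Objective: alternative (same O(n) cost).

-- ===== PORT A =====
-- while cur_person not in seen: seen.add; cur_visited.add; cur_person = favorite[cur_person]
-- (fuel-bounded; fuel 2*n+1 always suffices on Pre_ inputs)
def pvWalkA (fav : List Int) : Nat → PySem.Set Int → PySem.Set Int → Int → PySem.Set Int × PySem.Set Int × Int
  | 0, seen, vis, cur => (seen, vis, cur)
  | f+1, seen, vis, cur =>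
    if PySem.Set.contains seen cur then (seen, vis, cur)
    else pvWalkA fav f (PySem.Set.add seen cur) (PySem.Set.add vis cur) (PySem.List.pyGetD fav cur 0)

-- while begin_person != cur_person: visited_person_cnt -= 1; begin_person = favorite[begin_person]
def pvCycleA (fav : List Int) : Nat → Int → Int → Int → Int
  | 0, _, _, cnt => cnt
  | f+1, beg, cur, cnt =>
    if beg = cur then cnt
    else pvCycleA fav f (PySem.List.pyGetD fav beg 0) cur (cnt - 1)

def get_max_cycle_length (favorite : List Int) : Int :=
  ((PySem.List.pyRange 0 (PySem.List.len favorite) 1).foldl (fun st i =>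
    if PySem.Set.contains st.1 i then st
    else
      let r := pvWalkA favorite (2 * favorite.length + 1) st.1 PySem.Set.empty i
      if PySem.Set.contains r.2.1 r.2.2 then
        (r.1, max st.2 (pvCycleA favorite r.2.1.length i r.2.2 (PySem.Set.len r.2.1)))
      else (r.1, st.2)) (PySem.Set.empty, 0)).2

-- ===== PORT B =====
-- while cur not in mark: mark[cur] = (i, step); step += 1; cur = favorite[cur]
def pvWalkB (fav : List Int) (i : Int) : Nat → PySem.Dict Int (Int × Int) → Int → Int → PySem.Dict Int (Int × Int) × Int × Int
  | 0, mark, step, cur => (mark, step, cur)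
  | f+1, mark, step, cur =>
    if mark.contains cur then (mark, step, cur)
    else pvWalkB fav i f (mark.insert cur (i, step)) (step + 1) (PySem.List.pyGetD fav cur 0)

-- the for-loop over range(len(favorite)), as structural recursion on the remaining count
-- (mark[cur] is present whenever Python reads it; the port's getD default (-1, 0) is never the value read)
def pvOuterB (fav : List Int) : Nat → Int → PySem.Dict Int (Int × Int) → Int → Int
  | 0, _, _, best => best
  | n+1, i, mark, best =>
    if mark.contains i then pvOuterB fav n (i + 1) mark best
    else
      let r := pvWalkB fav i (2 * fav.length + 1) mark 0 i
      let sd := r.1.getD r.2.2 (-1, 0)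
      if sd.1 = i then pvOuterB fav n (i + 1) r.1 (max best (r.2.1 - sd.2))
      else pvOuterB fav n (i + 1) r.1 best

def get_max_cycle_length_alt (favorite : List Int) : Int :=
  pvOuterB favorite favorite.length 0 PySem.Dict.empty 0

-- ===== PRECONDITION & SPEC =====
-- Pre_: every favorite value is a valid Python index into the list; outside, favorite[cur]
-- raises IndexError in A.
def Pre_get_max_cycle_length (favorite : List Int) : Prop :=
  ∀ v ∈ favorite, PySem.Raise.InRange favorite.length v
instance (favorite : List Int) : Decidable (Pre_get_max_cycle_length favorite) := by
  unfold Pre_get_max_cycle_length; infer_instance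

def pvWitness_get_max_cycle_length : List Int := [1, 0, 2]

def Spec_get_max_cycle_length (favorite : List Int) (out : Int) : Prop := out = get_max_cycle_length_alt favorite
instance (favorite : List Int) (out : Int) : Decidable (Spec_get_max_cycle_length favorite out) := by unfold Spec_get_max_cycle_length; infer_instance

-- ===== CLAIM (what is proved, stated in full; the proofs are below) =====
def Claim_equal_get_max_cycle_length : Prop := ∀ (favorite : List Int), Dom_get_max_cycle_length favorite → Pre_get_max_cycle_length favorite → Spec_get_max_cycle_length favorite (get_max_cycle_length favorite)

-- ===== LEMMAS AND PROOFS =====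

-- The common skeleton of both while-loops: the list of nodes newly visited (in order) and the final cur.
def pvPath (fav : List Int) : Nat → PySem.Set Int → Int → List Int × Int
  | 0, _, cur => ([], cur)
  | f+1, seen, cur =>
    if PySem.Set.contains seen cur then ([], cur)
    else
      let r := pvPath fav f (PySem.Set.add seen cur) (PySem.List.pyGetD fav cur 0)
      (cur :: r.1, r.2)

-- What B's walk does to the dict, factored out.
def pvMarkUpd : PySem.Dict Int (Int × Int) → Int → Int → List Int → PySem.Dict Int (Int × Int)
  | d, _, _, [] => d
  | d, i, step, x :: xs => pvMarkUpd (d.insert x (i, step)) i (step + 1) xs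

-- the start component recorded in any entry of B's dict is itself a key (it was marked first)
def pvInv (d : PySem.Dict Int (Int × Int)) : Prop :=
  ∀ k : Int, d.contains k = true → (d.getD k (-1, 0)).1 ∈ d.keys

theorem pvDict_contains_eq {V : Type} (d : PySem.Dict Int V) (x : Int) :
    d.contains x = PySem.Set.contains d.keys x := by
  by_cases h : x ∈ d.keys
  · rw [(PySem.Dict.contains_iff_mem_keys _ _).2 h, (PySem.Set.contains_iff _ _).2 h]
  · have h1 : d.contains x = false := by
      cases hb : d.contains x
      · rfl
      · exact absurd ((PySem.Dict.contains_iff_mem_keys _ _).1 hb) h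
    have h2 : PySem.Set.contains d.keys x = false := by
      cases hb : PySem.Set.contains d.keys x
      · rfl
      · exact absurd ((PySem.Set.contains_iff _ _).1 hb) h
    rw [h1, h2]

theorem pvPath_fresh (fav : List Int) : ∀ (f : Nat) (seen : PySem.Set Int) (cur x : Int),
    x ∈ (pvPath fav f seen cur).1 → x ∉ seen := by
  intro f
  induction f with
  | zero => intro seen cur x h; simp [pvPath] at h
  | succ f ih =>
    intro seen cur x h
    simp only [pvPath] at h
    split at h
    · simp at h
    · rename_i hc
      simp only [List.mem_cons] at h
      rcases h with rfl | h
      · intro hx; exact hc ((PySem.Set.contains_iff _ _).2 hx)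
      · intro hx
        exact ih _ _ x h (by simp [PySem.Set.mem_add]; left; exact hx)

theorem pvPath_nodup (fav : List Int) : ∀ (f : Nat) (seen : PySem.Set Int) (cur : Int),
    (pvPath fav f seen cur).1.Nodup := by
  intro f
  induction f with
  | zero => intro seen cur; simp [pvPath]
  | succ f ih =>
    intro seen cur
    simp only [pvPath]
    split
    · simp
    · simp only [List.nodup_cons]
      refine ⟨fun h => ?_, ih _ _⟩
      have := pvPath_fresh fav f _ _ _ h
      simp [PySem.Set.mem_add] at this

theorem pvPath_head (fav : List Int) : ∀ (f : Nat) (seen : PySem.Set Int) (cur : Int),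
    ((pvPath fav f seen cur).1 ++ [(pvPath fav f seen cur).2]).head? = some cur := by
  intro f
  induction f with
  | zero => intro seen cur; simp [pvPath]
  | succ f ih =>
    intro seen cur
    simp only [pvPath]
    split <;> simp

theorem pvPath_chain (fav : List Int) : ∀ (f : Nat) (seen : PySem.Set Int) (cur : Int),
    List.IsChain (fun a b => b = PySem.List.pyGetD fav a 0)
      ((pvPath fav f seen cur).1 ++ [(pvPath fav f seen cur).2]) := by
  intro f
  induction f with
  | zero => intro seen cur; simp [pvPath]
  | succ f ih =>
    intro seen cur
    simp only [pvPath]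
    split
    · simp
    · simp only [List.cons_append, List.isChain_cons]
      refine ⟨?_, ih _ _⟩
      intro y hy
      rw [pvPath_head fav f _ _] at hy
      simp at hy; exact hy.symm

theorem pvWalkA_eq (fav : List Int) : ∀ (f : Nat) (seen vis : PySem.Set Int) (cur : Int),
    pvWalkA fav f seen vis cur =
      ((pvPath fav f seen cur).1.foldl PySem.Set.add seen,
       (pvPath fav f seen cur).1.foldl PySem.Set.add vis,
       (pvPath fav f seen cur).2) := by
  intro f
  induction f with
  | zero => intro seen vis cur; simp [pvWalkA, pvPath]
  | succ f ih =>
    intro seen vis cur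
    simp only [pvWalkA, pvPath]
    split
    · simp
    · simp only [List.foldl_cons]
      exact ih _ _ _

theorem pvWalkB_eq (fav : List Int) (i : Int) : ∀ (f : Nat) (mark : PySem.Dict Int (Int × Int)) (step cur : Int),
    pvWalkB fav i f mark step cur =
      (pvMarkUpd mark i step (pvPath fav f mark.keys cur).1,
       step + (pvPath fav f mark.keys cur).1.length,
       (pvPath fav f mark.keys cur).2) := by
  intro f
  induction f with
  | zero => intro mark step cur; simp [pvWalkB, pvPath, pvMarkUpd]
  | succ f ih =>
    intro mark step cur
    have hcc : mark.contains cur = PySem.Set.contains mark.keys cur := pvDict_contains_eq mark cur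
    simp only [pvWalkB, pvPath, hcc]
    split
    · simp [pvMarkUpd]
    · rename_i hc
      have hcf : mark.contains cur = false := by
        rw [hcc]
        cases hb : PySem.Set.contains mark.keys cur
        · rfl
        · exact absurd hb hc
      have hkeys : (mark.insert cur (i, step)).keys = PySem.Set.add mark.keys cur := by
        rw [PySem.Dict.keys_insert_of_not_contains _ _ hcf]
        simp only [PySem.Set.add]
        rw [if_neg hc]
      rw [ih]
      rw [hkeys]
      simp only [pvMarkUpd, List.length_cons, Prod.mk.injEq, true_and, and_true]
      push_cast; ring

theorem pvCycleA_eq (fav : List Int) : ∀ (q : List Int) (c cnt : Int) (f : Nat),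
    q.length ≤ f → c ∉ q →
    List.IsChain (fun a b => b = PySem.List.pyGetD fav a 0) (q ++ [c]) →
    pvCycleA fav f ((q ++ [c]).headI) c cnt = cnt - q.length := by
  intro q
  induction q with
  | nil =>
    intro c cnt f _ _ _
    cases f <;> simp [pvCycleA]
  | cons x q ih =>
    intro c cnt f hf hm hch
    obtain ⟨f, rfl⟩ : ∃ f', f = f' + 1 := ⟨f - 1, by simp at hf; omega⟩
    simp only [List.cons_append, List.headI_cons, pvCycleA]
    rw [if_neg (by simp at hm; tauto)]
    simp only [List.cons_append, List.isChain_cons] at hch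
    have hhead : (q ++ [c]).headI = PySem.List.pyGetD fav x 0 := by
      have : (q ++ [c]).head? = some (q ++ [c]).headI := by
        cases q <;> simp
      exact hch.1 _ this
    rw [← hhead, ih c (cnt - 1) f (by simp at hf ⊢; omega) (by simp at hm; tauto) hch.2]
    simp only [List.length_cons]; push_cast; ring

theorem pvCycleA_value (fav : List Int) (p : List Int) (c i : Int)
    (hnd : p.Nodup) (hc : c ∈ p)
    (hhd : (p ++ [c]).head? = some i)
    (hch : List.IsChain (fun a b => b = PySem.List.pyGetD fav a 0) (p ++ [c])) :
    pvCycleA fav p.length i c (PySem.Set.len p) = (p.length : Int) - (p.idxOf c : Int) := by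
  have hd : List.idxOf c p < p.length := List.idxOf_lt_length_of_mem hc
  have hq1 : (List.take (List.idxOf c p) p).length = List.idxOf c p := by
    simp [List.length_take]; omega
  have hqc : List.take (List.idxOf c p) p ++ [c] = List.take (List.idxOf c p + 1) p := by
    rw [List.take_add_one, List.getElem?_eq_getElem hd, List.getElem_idxOf]
    simp
  have hchain : List.IsChain (fun a b => b = PySem.List.pyGetD fav a 0)
      (List.take (List.idxOf c p) p ++ [c]) := by
    rw [hqc]
    exact hch.prefix ((List.take_prefix _ _).trans (List.prefix_append _ _))
  have hcm : c ∉ List.take (List.idxOf c p) p := by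
    intro hmem
    rw [List.mem_take_iff_idxOf_lt hc] at hmem
    omega
  obtain ⟨p', rfl⟩ : ∃ p', p = i :: p' := by
    cases p with
    | nil => simp at hc
    | cons a p' =>
      simp at hhd
      exact ⟨p', by rw [hhd]⟩
  have hhead : (List.take (List.idxOf c (i :: p')) (i :: p') ++ [c]).headI = i := by
    rw [hqc]
    simp [List.take_succ_cons]
  have hcy := pvCycleA_eq fav (List.take (List.idxOf c (i :: p')) (i :: p')) c
    (PySem.Set.len (i :: p')) (i :: p').length (by rw [hq1]; omega) hcm hchain
  rw [hhead] at hcy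
  rw [hcy, hq1]
  have hlen : PySem.Set.len (i :: p') = ((i :: p').length : Int) := by
    simp [PySem.Set.len]
  rw [hlen]

theorem pvFoldlAdd : ∀ (p : List Int) (s : PySem.Set Int),
    p.Nodup → (∀ x ∈ p, x ∉ s) → p.foldl PySem.Set.add s = s ++ p := by
  intro p
  induction p with
  | nil => intro s _ _; simp
  | cons x p ih =>
    intro s hnd hf
    simp only [List.nodup_cons] at hnd
    simp only [List.foldl_cons]
    have hadd : PySem.Set.add s x = s ++ [x] := by
      simp only [PySem.Set.add]
      rw [if_neg (fun hb => hf x (by simp) ((PySem.Set.contains_iff _ _).1 hb))]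
    rw [hadd, ih (s ++ [x]) hnd.2 ?_]
    · simp
    · intro y hy
      simp only [List.mem_append, List.mem_singleton, not_or]
      exact ⟨hf y (by simp [hy]), fun h => hnd.1 (h ▸ hy)⟩

theorem pvMarkUpd_getD_of_not_mem : ∀ (p : List Int) (d : PySem.Dict Int (Int × Int)) (i step x : Int) (v0 : Int × Int),
    x ∉ p → (pvMarkUpd d i step p).getD x v0 = d.getD x v0 := by
  intro p
  induction p with
  | nil => intro d i step x v0 _; rfl
  | cons y p ih =>
    intro d i step x v0 hx
    simp only [List.mem_cons, not_or] at hx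
    simp only [pvMarkUpd]
    rw [ih _ _ _ _ _ hx.2, PySem.Dict.getD_insert_of_ne _ _ _ hx.1]

theorem pvMarkUpd_getD : ∀ (p : List Int) (d : PySem.Dict Int (Int × Int)) (i step x : Int) (v0 : Int × Int),
    x ∈ p → p.Nodup → (pvMarkUpd d i step p).getD x v0 = (i, step + p.idxOf x) := by
  intro p
  induction p with
  | nil => intro d i step x v0 hx; simp at hx
  | cons y p ih =>
    intro d i step x v0 hx hnd
    simp only [List.nodup_cons] at hnd
    by_cases hxy : x = y
    · subst hxy
      simp only [pvMarkUpd]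
      rw [pvMarkUpd_getD_of_not_mem _ _ _ _ _ _ hnd.1, PySem.Dict.getD_insert_self]
      simp
    · simp only [List.mem_cons] at hx
      simp only [pvMarkUpd]
      rw [ih _ _ _ _ _ (hx.resolve_left hxy) hnd.2]
      rw [List.idxOf_cons_ne _ (by exact fun h => hxy h.symm)]
      push_cast; ring_nf

theorem pvMarkUpd_keys : ∀ (p : List Int) (d : PySem.Dict Int (Int × Int)) (i step : Int),
    (∀ x ∈ p, d.contains x = false) → p.Nodup → (pvMarkUpd d i step p).keys = d.keys ++ p := by
  intro p
  induction p with
  | nil => intro d i step _ _; simp [pvMarkUpd]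
  | cons y p ih =>
    intro d i step hf hnd
    simp only [List.nodup_cons] at hnd
    simp only [pvMarkUpd]
    rw [ih _ _ _ ?_ hnd.2]
    · rw [PySem.Dict.keys_insert_of_not_contains _ _ (hf y (by simp))]
      simp
    · intro x hx
      rw [PySem.Dict.contains_insert]
      simp only [Bool.or_eq_false_iff]
      exact ⟨by simp; exact fun h => hnd.1 (h ▸ hx), hf x (by simp [hx])⟩

theorem pvInv_markUpd (d : PySem.Dict Int (Int × Int)) (i step : Int) (p : List Int)
    (hnd : p.Nodup) (hfr : ∀ x ∈ p, d.contains x = false) (hi : i ∈ p)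
    (hInv : pvInv d) : pvInv (pvMarkUpd d i step p) := by
  intro k hk
  have hkeys : (pvMarkUpd d i step p).keys = d.keys ++ p := pvMarkUpd_keys p d i step hfr hnd
  by_cases hkp : k ∈ p
  · rw [pvMarkUpd_getD p d i step k _ hkp hnd, hkeys]
    simp [hi]
  · rw [pvMarkUpd_getD_of_not_mem p d i step k _ hkp]
    have hk' : d.contains k = true := by
      have := (PySem.Dict.contains_iff_mem_keys _ _).1 hk
      rw [hkeys] at this
      simp only [List.mem_append] at this
      exact (PySem.Dict.contains_iff_mem_keys _ _).2 (this.resolve_right hkp)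
    have := hInv k hk'
    rw [hkeys]
    simp [this]

theorem pvOuter_eq (fav : List Int) : ∀ (n : Nat) (i : Int) (mark : PySem.Dict Int (Int × Int)) (best : Int),
    0 ≤ i → pvInv mark →
    pvOuterB fav n i mark best =
      ((PySem.List.pyRange i (i + n) 1).foldl (fun st j =>
        if PySem.Set.contains st.1 j then st
        else
          let r := pvWalkA fav (2 * fav.length + 1) st.1 PySem.Set.empty j
          if PySem.Set.contains r.2.1 r.2.2 then
            (r.1, max st.2 (pvCycleA fav r.2.1.length j r.2.2 (PySem.Set.len r.2.1)))
          else (r.1, st.2)) (mark.keys, best)).2 := by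
  intro n
  induction n with
  | zero =>
    intro i mark best _ _
    simp [pvOuterB]
  | succ n ih =>
    intro i mark best hi hInv
    have hcast : i + ((n + 1 : Nat) : Int) = i + ((n : Int) + 1) := by push_cast ; ring
    rw [hcast, PySem.List.pyRange_one_cons (by omega : i < i + ((n : Int) + 1)), List.foldl_cons]
    have hcc := pvDict_contains_eq mark i
    have hbound : i + ((n : Int) + 1) = (i + 1) + (n : Nat) := by ring
    by_cases hmi : PySem.Set.contains mark.keys i = true
    · have hct : mark.contains i = true := by rw [hcc]; exact hmi
      simp only [pvOuterB, hct, if_pos, hmi]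
      rw [ih (i + 1) mark best (by omega) hInv, hbound]
    · have hcf : mark.contains i = false := by
        rw [hcc]
        cases hb : PySem.Set.contains mark.keys i
        · rfl
        · exact absurd hb hmi
      rcases hP : pvPath fav (2 * fav.length + 1) mark.keys i with ⟨p, c⟩
      have hnd : p.Nodup := by
        have := pvPath_nodup fav (2 * fav.length + 1) mark.keys i
        rw [hP] at this; exact this
      have hfr : ∀ x ∈ p, x ∉ mark.keys := by
        intro x hx
        exact pvPath_fresh fav (2 * fav.length + 1) mark.keys i x (by rw [hP]; exact hx)
      have hfrc : ∀ x ∈ p, mark.contains x = false := by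
        intro x hx
        rw [pvDict_contains_eq]
        cases hb : PySem.Set.contains mark.keys x
        · rfl
        · exact absurd ((PySem.Set.contains_iff _ _).1 hb) (hfr x hx)
      have hhd : (p ++ [c]).head? = some i := by
        have := pvPath_head fav (2 * fav.length + 1) mark.keys i
        rw [hP] at this; exact this
      have hch : List.IsChain (fun a b => b = PySem.List.pyGetD fav a 0) (p ++ [c]) := by
        have := pvPath_chain fav (2 * fav.length + 1) mark.keys i
        rw [hP] at this; exact this
      have hseen : p.foldl PySem.Set.add mark.keys = mark.keys ++ p := pvFoldlAdd p _ hnd hfr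
      have hvis : p.foldl PySem.Set.add PySem.Set.empty = p := by
        have h0 := pvFoldlAdd p PySem.Set.empty hnd (by intro x _; simp [PySem.Set.empty])
        simpa [PySem.Set.empty] using h0
      have hkeys' : (pvMarkUpd mark i 0 p).keys = mark.keys ++ p := pvMarkUpd_keys p mark i 0 hfrc hnd
      -- the value of the loop body for this i on A's side
      have hA : (fun (st : PySem.Set Int × Int) (j : Int) =>
          if PySem.Set.contains st.1 j then st
          else
            let r := pvWalkA fav (2 * fav.length + 1) st.1 PySem.Set.empty j
            if PySem.Set.contains r.2.1 r.2.2 then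
              (r.1, max st.2 (pvCycleA fav r.2.1.length j r.2.2 (PySem.Set.len r.2.1)))
            else (r.1, st.2)) (mark.keys, best) i
          = (mark.keys ++ p,
             if c ∈ p then max best ((p.length : Int) - (p.idxOf c : Int)) else best) := by
        simp only [if_neg hmi, pvWalkA_eq, hP, hseen, hvis]
        by_cases hc : c ∈ p
        · rw [if_pos ((PySem.Set.contains_iff p c).2 hc), if_pos hc,
            pvCycleA_value fav p c i hnd hc hhd hch]
        · rw [if_neg (by
            cases hb : PySem.Set.contains p c
            · simp
            · exact absurd ((PySem.Set.contains_iff _ _).1 hb) hc), if_neg hc]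
      -- the value of the loop body for this i on B's side
      have hB : pvOuterB fav (n + 1) i mark best
          = pvOuterB fav n (i + 1) (pvMarkUpd mark i 0 p)
             (if c ∈ p then max best ((p.length : Int) - (p.idxOf c : Int)) else best) := by
        simp only [pvOuterB, hcf, Bool.false_eq_true, if_false, pvWalkB_eq, hP]
        by_cases hc : c ∈ p
        · rw [pvMarkUpd_getD p mark i 0 c _ hc hnd]
          rw [if_pos rfl, if_pos hc]
          norm_num
        · rw [pvMarkUpd_getD_of_not_mem p mark i 0 c _ hc, if_neg hc]
          by_cases hcm : mark.contains c = true
          · rw [if_neg ?_]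
            have hmem := hInv c hcm
            intro hEq
            rw [hEq] at hmem
            exact absurd ((PySem.Set.contains_iff _ _).2 hmem) hmi
          · rw [PySem.Dict.getD_of_not_contains mark _ (by
              cases hb : mark.contains c
              · rfl
              · exact absurd hb hcm)]
            rw [if_neg (by intro hEq; omega)]
      rw [hB]
      simp only [hA]
      have hInv' : pvInv (pvMarkUpd mark i 0 p) := by
        refine pvInv_markUpd mark i 0 p hnd hfrc ?_ hInv
        cases p with
        | nil =>
          exfalso
          simp only [List.nil_append, List.head?_cons, Option.some.injEq] at hhd
          subst hhd
          -- p = [], so pvPath took no step although i was not in seen: impossible with fuel ≥ 1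
          simp only [pvPath] at hP
          rw [if_neg hmi] at hP
          simp at hP
        | cons a p' =>
          simp only [List.cons_append, List.head?_cons, Option.some.injEq] at hhd
          subst hhd
          exact List.mem_cons_self
      rw [ih (i + 1) (pvMarkUpd mark i 0 p) _ (by omega) hInv', hkeys', hbound]

theorem pvInv_empty : pvInv PySem.Dict.empty := by
  intro k hk
  rw [PySem.Dict.contains_empty] at hk
  cases hk

-- ===== VERDICT (by name: the statement is the Claim_ definition above) =====
theorem get_max_cycle_length_spec : Claim_equal_get_max_cycle_length := by
  intro fav _ _
  unfold Spec_get_max_cycle_length get_max_cycle_length get_max_cycle_length_alt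
  rw [pvOuter_eq fav fav.length 0 PySem.Dict.empty 0 le_rfl pvInv_empty]
  simp [PySem.List.len, PySem.Dict.keys_empty, PySem.Set.empty]
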